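-- pv_equiv track=rewrite | github.com/ongsim0629/Algorithm | 백준/Gold/5904. Moo 게임/Moo 게임.py | calc_moo_num
-- ===== SOURCE A (Python) =====
-- def calc_moo_num(number):
--     i = 3
--     count = 0
--     while i < number:
--         count += 1
--         tmp = i * 2 + (count + 3)
--         i = tmp
--     return count
-- ===== SOURCE B (Python) =====
-- def calc_moo_num(number):
--     # Closed form of A's recurrence: after n iterations i = 2**(n+3) - n - 5,
--     # which is strictly increasing in n.  Return the least n with value >= number
--     # by binary search over n (upper bound found by doubling).
--     def val(n):
--         return (1 << (n + 3)) - n - 5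
--
--     if number <= 3:
--         return 0
--     hi = 1
--     while val(hi) < number:
--         hi *= 2
--     lo = 0
--     while lo < hi:
--         mid = (lo + hi) // 2
--         if val(mid) >= number:
--             hi = mid
--         else:
--             lo = mid + 1
--     return lo
-- ===== Notes on version B (the rewrite author's own statement) =====
-- stated objective: alternative
-- what changed: Replaces A's incremental accumulator loop over the running value with the closed form 2^(n+3)-n-5 for the n-th value and a binary search over the index n (doubling for an upper bound, then bisection).
import Mathlib
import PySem

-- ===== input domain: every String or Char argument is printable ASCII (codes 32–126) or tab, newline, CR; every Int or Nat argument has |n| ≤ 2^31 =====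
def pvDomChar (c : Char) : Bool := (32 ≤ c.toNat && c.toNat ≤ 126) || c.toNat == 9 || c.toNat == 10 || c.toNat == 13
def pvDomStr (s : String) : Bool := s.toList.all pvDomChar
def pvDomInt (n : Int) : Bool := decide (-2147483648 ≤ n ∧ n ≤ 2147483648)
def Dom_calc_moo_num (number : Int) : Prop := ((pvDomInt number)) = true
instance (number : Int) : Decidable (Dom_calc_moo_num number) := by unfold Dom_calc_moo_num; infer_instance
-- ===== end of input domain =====

-- B replaces A's incremental accumulator loop with the closed form 2^(n+3)-n-5 and a
-- binary search over the index n (doubling upper bound, then bisection): a different algorithm, fewer iterations.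


-- ===== PORT A =====
-- A's while loop, with fuel as a totality guard only: on Dom (number ≤ 2^31) the loop
-- exits within 29 iterations, so fuel 64 is never exhausted there.
def calcLoopA (number : Int) : Nat → Int → Int → Int
  | 0, _, count => count
  | fuel + 1, i, count =>
    if i < number then
      calcLoopA number fuel (i * 2 + ((count + 1) + 3)) (count + 1)
    else count

def calc_moo_num (number : Int) : Int := calcLoopA number 64 3 0

-- ===== PORT B =====
-- val(n) = (1 << (n+3)) - n - 5; n is always ≥ 0 where B calls it, so .toNat is exact.
def mooVal (n : Int) : Int := 2 ^ (n + 3).toNat - n - 5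

-- while val(hi) < number: hi *= 2   (fuel is a totality guard only; ≤ 6 doublings on Dom)
def mooHi (number : Int) : Nat → Int → Int
  | 0, hi => hi
  | fuel + 1, hi => if mooVal hi < number then mooHi number fuel (hi * 2) else hi

-- while lo < hi: bisect   (fuel is a totality guard only)
def mooBisect (number : Int) : Nat → Int → Int → Int
  | 0, lo, _ => lo
  | fuel + 1, lo, hi =>
    if lo < hi then
      let mid := PySem.Int.floordiv (lo + hi) 2
      if mooVal mid ≥ number then mooBisect number fuel lo mid
      else mooBisect number fuel (mid + 1) hi
    else lo

def calc_moo_num_alt (number : Int) : Int :=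
  if number ≤ 3 then 0
  else mooBisect number 64 0 (mooHi number 64 1)

-- ===== PRECONDITION & SPEC =====
def Spec_calc_moo_num (number : Int) (out : Int) : Prop := out = calc_moo_num_alt number
instance (number : Int) (out : Int) : Decidable (Spec_calc_moo_num number out) := by unfold Spec_calc_moo_num; infer_instance

-- ===== CLAIM (what is proved, stated in full; the proofs are below) =====
def Claim_equal_calc_moo_num : Prop := ∀ (number : Int), Dom_calc_moo_num number → Spec_calc_moo_num number (calc_moo_num number)

-- ===== LEMMAS AND PROOFS =====

-- The closed form of A's recurrence, indexed by Nat.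
def F (n : Nat) : Int := 2 ^ (n + 3) - n - 5

lemma mooVal_natCast (n : Nat) : mooVal (n : Int) = F n := by
  have h : ((n : Int) + 3).toNat = n + 3 := by omega
  simp [mooVal, F, h]

lemma F_strictMono : StrictMono F := by
  apply strictMono_nat_of_lt_succ
  intro n
  have h : (8 : Int) ≤ 2 ^ (n + 3) := by
    calc (8 : Int) = 2 ^ 3 := by norm_num
    _ ≤ 2 ^ (n + 3) := by exact pow_le_pow_right₀ (by norm_num) (by omega)
  have h2 : (2 : Int) ^ (n + 1 + 3) = 2 * 2 ^ (n + 3) := by ring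
  simp only [F]
  omega

lemma F_mono {m n : Nat} (h : m ≤ n) : F m ≤ F n := F_strictMono.monotone h

lemma F_step (c : Nat) : F c * 2 + ((c : Int) + 1 + 3) = F (c + 1) := by
  simp only [F]
  push_cast
  ring

lemma good_unique (number : Int) (r s : Nat)
    (hr1 : number ≤ F r) (hr2 : ∀ m, m < r → F m < number)
    (hs1 : number ≤ F s) (hs2 : ∀ m, m < s → F m < number) : r = s := by
  rcases lt_trichotomy r s with h | h | h
  · exact absurd hr1 (not_le.mpr (hs2 r h))
  · exact h
  · exact absurd hs1 (not_le.mpr (hr2 s h))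

lemma loopA_good (number : Int) :
    ∀ (fuel c : Nat), (∀ m, m < c → F m < number) → number ≤ F (c + fuel) →
      ∃ r : Nat, calcLoopA number fuel (F c) (c : Int) = (r : Int) ∧
        number ≤ F r ∧ (∀ m, m < r → F m < number) := by
  intro fuel
  induction fuel with
  | zero =>
    intro c hinv hbound
    exact ⟨c, rfl, by simpa using hbound, hinv⟩
  | succ fuel ih =>
    intro c hinv hbound
    by_cases h : F c < number
    · have hrec := ih (c + 1)
        (by
          intro m hm
          rcases Nat.lt_succ_iff_lt_or_eq.mp hm with hm' | hm'
          · exact hinv m hm'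
          · exact hm' ▸ h)
        (by
          have : c + 1 + fuel = c + (fuel + 1) := by omega
          rw [this]; exact hbound)
      obtain ⟨r, hr, hr1, hr2⟩ := hrec
      refine ⟨r, ?_, hr1, hr2⟩
      simp only [calcLoopA, if_pos h]
      rw [F_step c]
      have hcast : ((c : Int) + 1) = ((c + 1 : Nat) : Int) := by push_cast; ring
      rw [hcast]
      exact hr
    · refine ⟨c, ?_, not_lt.mp h, hinv⟩
      simp only [calcLoopA, if_neg h]

lemma mooHi_good (number : Int) :
    ∀ (fuel h m : Nat), 0 < h → number ≤ F m → number ≤ F (h * 2 ^ fuel) →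
      ∃ r : Nat, mooHi number fuel (h : Int) = (r : Int) ∧ number ≤ F r ∧ r ≤ max h (2 * m) := by
  intro fuel
  induction fuel with
  | zero =>
    intro h m hh hm hbound
    refine ⟨h, rfl, by simpa using hbound, le_max_left _ _⟩
  | succ fuel ih =>
    intro h m hh hm hbound
    by_cases hc : mooVal (h : Int) < number
    · have hFh : F h < number := by rwa [mooVal_natCast] at hc
      have hhm : h < m := by
        by_contra hcon
        exact absurd (le_trans hm (F_mono (not_lt.mp hcon))) (not_le.mpr hFh)
      have hrec := ih (2 * h) m (by omega) hm
        (by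
          have : 2 * h * 2 ^ fuel = h * 2 ^ (fuel + 1) := by ring
          rw [this]; exact hbound)
      obtain ⟨r, hr, hr1, hr2⟩ := hrec
      refine ⟨r, ?_, hr1, ?_⟩
      · simp only [mooHi, if_pos hc]
        have : (h : Int) * 2 = ((2 * h : Nat) : Int) := by push_cast; ring
        rw [this]; exact hr
      · have : max (2 * h) (2 * m) = 2 * m := by omega
        omega
    · refine ⟨h, ?_, ?_, le_max_left _ _⟩
      · simp only [mooHi, if_neg hc]
      · rw [mooVal_natCast] at hc; exact not_lt.mp hc

lemma bisect_good (number : Int) :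
    ∀ (fuel lo hi : Nat), lo ≤ hi → hi - lo < 2 ^ fuel →
      (∀ m, m < lo → F m < number) → number ≤ F hi →
      ∃ r : Nat, mooBisect number fuel (lo : Int) (hi : Int) = (r : Int) ∧
        number ≤ F r ∧ (∀ m, m < r → F m < number) := by
  intro fuel
  induction fuel with
  | zero =>
    intro lo hi hle hfuel hinv hhi
    have h1 : hi - lo < 1 := by simpa using hfuel
    have : lo = hi := by omega
    subst this
    exact ⟨lo, rfl, hhi, hinv⟩
  | succ fuel ih =>
    intro lo hi hle hfuel hinv hhi
    by_cases hlt : (lo : Int) < (hi : Int)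
    · have hlohi : lo < hi := by exact_mod_cast hlt
      have hmid : PySem.Int.floordiv ((lo : Int) + (hi : Int)) 2 = (((lo + hi) / 2 : Nat) : Int) := by
        have : ((lo : Int) + (hi : Int)) = ((lo + hi : Nat) : Int) := by push_cast; ring
        rw [this]
        exact_mod_cast PySem.Int.floordiv_natCast (lo + hi) 2
      set mid : Nat := (lo + hi) / 2 with hmiddef
      have hmlo : lo ≤ mid := by omega
      have hmhi : mid < hi := by omega
      by_cases hge : mooVal (((lo + hi) / 2 : Nat) : Int) ≥ number
      · have hFmid : number ≤ F mid := by rwa [mooVal_natCast] at hge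
        obtain ⟨r, hr, hr1, hr2⟩ := ih lo mid hmlo (by omega) hinv hFmid
        refine ⟨r, ?_, hr1, hr2⟩
        simp only [mooBisect, if_pos hlt]
        rw [hmid]
        rw [if_pos hge]
        exact hr
      · have hFmid : F mid < number := by
          rw [mooVal_natCast] at hge; exact not_le.mp hge
        have hinv' : ∀ m, m < mid + 1 → F m < number := by
          intro m hm
          exact lt_of_le_of_lt (F_mono (by omega)) hFmid
        obtain ⟨r, hr, hr1, hr2⟩ := ih (mid + 1) hi (by omega) (by omega) hinv' hhi
        refine ⟨r, ?_, hr1, hr2⟩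
        simp only [mooBisect, if_pos hlt]
        rw [hmid]
        rw [if_neg hge]
        have : (((lo + hi) / 2 : Nat) : Int) + 1 = ((mid + 1 : Nat) : Int) := by
          rw [hmiddef]; push_cast; ring
        rw [this]
        exact hr
    · have hlohi : ¬ lo < hi := by exact_mod_cast hlt
      have heq : lo = hi := by omega
      subst heq
      refine ⟨lo, ?_, hhi, hinv⟩
      simp only [mooBisect, if_neg hlt]

lemma F32_big : (2147483648 : Int) ≤ F 32 := by norm_num [F]

theorem calc_moo_num_spec : Claim_equal_calc_moo_num := by
  intro number hdom
  have hnum : number ≤ 2147483648 := by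
    simp only [Dom_calc_moo_num, pvDomInt, decide_eq_true_eq] at hdom
    exact hdom.2
  unfold Spec_calc_moo_num calc_moo_num calc_moo_num_alt
  by_cases h3 : number ≤ 3
  · -- A exits immediately: 3 < number is false
    have : ¬ ((3 : Int) < number) := by omega
    simp [calcLoopA, this, h3]
  · -- number > 3 = F 0; both sides compute the least n with number ≤ F n
    have hF0 : F 0 < number := by
      have : F 0 = 3 := by norm_num [F]
      omega
    have hbound : number ≤ F (0 + 64) := by
      calc number ≤ 2147483648 := hnum
      _ ≤ F 32 := F32_big
      _ ≤ F (0 + 64) := F_mono (by omega)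
    obtain ⟨rA, hrA, hrA1, hrA2⟩ := loopA_good number 64 0
      (by intro m hm; omega) hbound
    have hA : calcLoopA number 64 3 0 = (rA : Int) := by
      have hF0' : F 0 = 3 := by norm_num [F]
      rw [← hF0']
      exact_mod_cast hrA
    obtain ⟨rH, hrH, hrH1, hrH2⟩ := mooHi_good number 64 1 32 (by omega)
      (le_trans hnum F32_big)
      (by
        calc number ≤ F 32 := le_trans hnum F32_big
        _ ≤ F (1 * 2 ^ 64) := F_mono (by norm_num))
    obtain ⟨rB, hrB, hrB1, hrB2⟩ := bisect_good number 64 0 rH (by omega)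
      (by
        have : rH ≤ 64 := by omega
        have h64 : (64 : Nat) < 2 ^ 64 := by norm_num
        omega)
      (by intro m hm; omega) hrH1
    have hB : mooBisect number 64 0 (mooHi number 64 1) = (rB : Int) := by
      have hrH' : mooHi number 64 1 = (rH : Int) := by exact_mod_cast hrH
      rw [hrH']
      exact_mod_cast hrB
    rw [hA, if_neg h3, hB]
    exact_mod_cast congrArg (Nat.cast : Nat → Int)
      (good_unique number rA rB hrA1 hrA2 hrB1 hrB2)
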